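-- pv_equiv track=rewrite | github.com/williamtrang/DSC20 | lab/lab02.py | pick_username
-- ===== SOURCE A (Python) =====
-- def pick_username(names):
--     """
--     >>> pick_username(["JonaThan TanoTo", "WeiYue Li"])
--     'JonaThan TanoTo'
--     >>> pick_username(["JonaThan TanoTo", "WeiYue Li", "ShuBham KauShal"])
--     'ShuBham KauShal'
--     >>> pick_username(["JonaThan TanoTo", "WeiYue Li", \
-- "ShuBham KauShal", "MARINA"])
--     'MARINA'
--     """
--     max_index = 0
--     max_upper = 0
--     current_upper = 0
--
--     for i in range(0, len(names)):
--         current_upper = 0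
--         for j in range(0, len(names[i])):
--             if names[i][j].isupper():
--                 current_upper += 1
--         if current_upper >= max_upper:
--             max_index = i
--             max_upper = current_upper
--
--     return names[max_index]
-- ===== SOURCE B (Python) =====
-- def pick_username(names):
--     return sorted(names, key=lambda name: sum(c.isupper() for c in name))[-1]
-- ===== Notes on version B (the rewrite author's own statement) =====
-- stated objective: alternative
-- what changed: Replaces the explicit index-tracking running-max double loop with a stable sort of the names keyed by uppercase count and indexing the last element, so stability makes the last-occurring maximum win with no running-max bookkeeping.
import Mathlib
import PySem

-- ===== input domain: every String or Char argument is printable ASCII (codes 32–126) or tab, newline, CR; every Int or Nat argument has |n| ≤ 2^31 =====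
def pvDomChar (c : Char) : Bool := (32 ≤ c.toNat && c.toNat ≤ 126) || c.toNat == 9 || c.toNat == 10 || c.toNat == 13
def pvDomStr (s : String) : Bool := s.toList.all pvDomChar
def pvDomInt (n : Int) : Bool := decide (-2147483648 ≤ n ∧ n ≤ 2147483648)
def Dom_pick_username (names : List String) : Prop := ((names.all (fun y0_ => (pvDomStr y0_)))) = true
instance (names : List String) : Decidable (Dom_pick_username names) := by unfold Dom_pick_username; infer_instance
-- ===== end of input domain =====

-- B replaces A's explicit index-tracking double loop by a stable sort on the uppercase
-- count and taking the last element (objective: alternative); equal on nonempty input.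


-- ===== PORT A =====
-- literal port of A's double loop: an index loop keeping (max_index, max_upper),
-- with an inner index loop counting uppercase characters
def pick_username (names : List String) : String :=
  let st :=
    (PySem.List.pyRange 0 (PySem.List.len names) 1).foldl
      (fun (st : Int × Int) i =>
        let current_upper :=
          (PySem.List.pyRange 0 (PySem.List.len (PySem.List.pyGetD names i "").toList) 1).foldl
            (fun (acc : Int) j =>
              if PySem.Chars.isupper (PySem.List.pyGetD (PySem.List.pyGetD names i "").toList j ' ')
              then acc + 1 else acc) 0
        if current_upper ≥ st.2 then (i, current_upper) else st)
      ((0 : Int), (0 : Int))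
  PySem.List.pyGetD names st.1 ""

-- ===== PORT B =====
-- port of B: sorted(names, key=lambda name: sum(c.isupper() for c in name))[-1];
-- none = Python's IndexError on the empty list, excluded by Pre_
def pick_username_alt (names : List String) : String :=
  match PySem.List.pyGet?
      (PySem.List.sorted names
        (fun name => ((name.toList.map (fun c => if PySem.Chars.isupper c then (1 : Int) else 0)).sum)))
      (-1) with
  | some s => s
  | none => ""

-- ===== PRECONDITION & SPEC =====
-- Pre_ excludes only the empty list, on which A raises IndexError (and B raises IndexError too)
def Pre_pick_username (names : List String) : Prop := names ≠ []
instance (names : List String) : Decidable (Pre_pick_username names) := by unfold Pre_pick_username; infer_instance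
def pvWitness_pick_username : List String := (["Ab", "cD"])
def Spec_pick_username (names : List String) (out : String) : Prop := out = pick_username_alt names
instance (names : List String) (out : String) : Decidable (Spec_pick_username names out) := by unfold Spec_pick_username; infer_instance

-- ===== CLAIM (what is proved, stated in full; the proofs are below) =====
def Claim_equal_pick_username : Prop := ∀ (names : List String), Dom_pick_username names → Pre_pick_username names → Spec_pick_username names (pick_username names)

-- ===== LEMMAS AND PROOFS =====

-- the uppercase count of a name (the common value of A's inner loop and B's key)
def pvCnt (s : String) : Int := (s.toList.countP PySem.Chars.isupper : Int)

-- A's running champion over a list of names, starting from champion c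
def pvChamp (c : String) (t : List String) : String :=
  t.foldl (fun c y => if pvCnt y ≥ pvCnt c then y else c) c

-- the same champion with an Option accumulator (convenient for snoc induction)
def pvChampO (acc : Option String) (t : List String) : Option String :=
  t.foldl (fun acc y =>
    match acc with
    | none => some y
    | some c => if pvCnt c ≤ pvCnt y then some y else some c) acc

-- A's inner loop is the uppercase count
theorem pvCnt_inner (s : String) :
    (PySem.List.pyRange 0 (PySem.List.len s.toList) 1).foldl
      (fun (acc : Int) j => if PySem.Chars.isupper (PySem.List.pyGetD s.toList j ' ')
        then acc + 1 else acc) 0 = pvCnt s := by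
  rw [PySem.List.foldl_pyRange_zero_pyGetD s.toList ' '
      (fun (acc : Int) c => if PySem.Chars.isupper c then acc + 1 else acc) 0]
  rw [PySem.List.foldl_if_add_one]
  simp [pvCnt]

-- B's key is the uppercase count
theorem pvCnt_key (s : String) :
    ((s.toList.map (fun c => if PySem.Chars.isupper c then (1 : Int) else 0)).sum) = pvCnt s := by
  rw [PySem.List.sum_map_ite_one_zero]
  simp [pvCnt]

-- A's outer index loop is a fold over enumerate
theorem pvA_outer (names : List String) (init : Int × Int) :
    (PySem.List.pyRange 0 (PySem.List.len names) 1).foldl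
      (fun (st : Int × Int) i => if pvCnt (PySem.List.pyGetD names i "") ≥ st.2
        then (i, pvCnt (PySem.List.pyGetD names i "")) else st) init
    = (PySem.List.enumerate names 0).foldl
      (fun (st : Int × Int) p => if pvCnt p.2 ≥ st.2 then (p.1, pvCnt p.2) else st) init := by
  rw [PySem.List.enumerate_eq_map_pyRange names "", List.foldl_map]

-- invariant of A's outer loop: g reads the current champion back from its stored index
theorem pvA_loop (l : List String) (g : Int → String) :
    ∀ (s mi : Int) (c : String), g mi = c →
    (∀ p ∈ PySem.List.enumerate l s, g p.1 = p.2) →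
    ∃ j, (PySem.List.enumerate l s).foldl
        (fun (st : Int × Int) p => if pvCnt p.2 ≥ st.2 then (p.1, pvCnt p.2) else st)
        (mi, pvCnt c) = (j, pvCnt (pvChamp c l)) ∧ g j = pvChamp c l := by
  induction l with
  | nil => intro s mi c hc _; exact ⟨mi, by simp [PySem.List.enumerate, pvChamp], by simp [pvChamp, hc]⟩
  | cons y t ih =>
    intro s mi c hc hall
    rw [PySem.List.enumerate_cons]
    have hy : g s = y := hall (s, y) (by rw [PySem.List.enumerate_cons]; exact List.mem_cons_self ..)
    have hall' : ∀ p ∈ PySem.List.enumerate t (s + 1), g p.1 = p.2 := by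
      intro p hp; exact hall p (by rw [PySem.List.enumerate_cons]; exact List.mem_cons_of_mem _ hp)
    simp only [List.foldl_cons]
    by_cases h : pvCnt y ≥ pvCnt c
    · simp only [if_pos h]
      have := ih (s + 1) s y hy hall'
      simpa [pvChamp, h] using this
    · simp only [if_neg h]
      have := ih (s + 1) mi c hc hall'
      simpa [pvChamp, h] using this

-- pvChamp is pvChampO started from some
theorem pvChamp_eq_champO (t : List String) (c : String) :
    pvChampO (some c) t = some (pvChamp c t) := by
  induction t generalizing c with
  | nil => rfl
  | cons y t ih =>
    simp only [pvChampO, pvChamp, List.foldl_cons]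
    by_cases h : pvCnt c ≤ pvCnt y
    · simpa [pvChampO, pvChamp, h, show pvCnt y ≥ pvCnt c from h] using ih y
    · simpa [pvChampO, pvChamp, h, show ¬ pvCnt y ≥ pvCnt c from h] using ih c

-- inserting x into a key-sorted list: the last element becomes the ≥-champion of the two
theorem pvInsertBy_getLast? (ys : List String) (x m : String)
    (hp : ys.Pairwise (fun a b => pvCnt a ≤ pvCnt b)) (hm : ys.getLast? = some m) :
    (PySem.List.insertBy (fun a b => decide (pvCnt a < pvCnt b)) x ys).getLast?
      = some (if pvCnt m ≤ pvCnt x then x else m) := by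
  induction ys generalizing m with
  | nil => simp at hm
  | cons y t ih =>
    by_cases h : pvCnt x < pvCnt y
    · have hstep : PySem.List.insertBy (fun a b => decide (pvCnt a < pvCnt b)) x (y :: t)
          = x :: y :: t := by simp [PySem.List.insertBy, h]
      rw [hstep]
      have hym : pvCnt y ≤ pvCnt m := by
        rcases List.getLast?_eq_some_iff.mp hm with ⟨l', hl'⟩
        cases l' with
        | nil =>
          simp only [List.nil_append] at hl'
          have : y = m := by injection hl'
          simp [this]
        | cons a l'' =>
          have h3 : t = l'' ++ [m] := by simpa using congrArg List.tail hl'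
          have hmem : m ∈ t := by simp [h3]
          exact (List.pairwise_cons.mp hp).1 m hmem
      have hnot : ¬ pvCnt m ≤ pvCnt x := by omega
      rw [if_neg hnot]
      simpa using hm
    · have hstep : PySem.List.insertBy (fun a b => decide (pvCnt a < pvCnt b)) x (y :: t)
          = y :: PySem.List.insertBy (fun a b => decide (pvCnt a < pvCnt b)) x t := by
        simp [PySem.List.insertBy, h]
      rw [hstep]
      cases t with
      | nil =>
        have hmy : y = m := by simpa using hm
        subst hmy
        have hle : pvCnt y ≤ pvCnt x := by omega
        simp [PySem.List.insertBy, hle]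
      | cons z t' =>
        have hm' : (z :: t').getLast? = some m := by
          rw [List.getLast?_cons_cons] at hm; exact hm
        have hres := ih m (List.Pairwise.of_cons hp) hm'
        cases hI : PySem.List.insertBy (fun a b => decide (pvCnt a < pvCnt b)) x (z :: t') with
        | nil =>
          have hx : x ∈ PySem.List.insertBy (fun a b => decide (pvCnt a < pvCnt b)) x (z :: t') :=
            (PySem.List.mem_insertBy ..).mpr (Or.inl rfl)
          rw [hI] at hx
          simp at hx
        | cons w ws =>
          rw [hI] at hres
          rw [List.getLast?_cons_cons]
          exact hres
-- the last element of the stable sort is A's running champion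
theorem pvSorted_getLast? (names : List String) :
    (PySem.List.sorted names pvCnt).getLast? = pvChampO none names := by
  induction names using List.reverseRecOn with
  | nil => rfl
  | append_singleton l x ih =>
    rw [PySem.List.sorted_eq_foldl_insertBy, List.foldl_append, List.foldl_cons, List.foldl_nil,
        ← PySem.List.sorted_eq_foldl_insertBy]
    have hc : pvChampO none (l ++ [x])
        = (match pvChampO none l with
            | none => some x
            | some c => if pvCnt c ≤ pvCnt x then some x else some c) := by
      simp only [pvChampO, List.foldl_append, List.foldl_cons, List.foldl_nil]
    rw [hc]
    cases hcase : (PySem.List.sorted l pvCnt).getLast? with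
    | none =>
      have hl : l = [] := by
        have : PySem.List.sorted l pvCnt = [] := List.getLast?_eq_none_iff.mp hcase
        exact (PySem.List.sorted_eq_nil_iff ..).mp this
      subst hl
      simp [pvChampO, PySem.List.sorted_eq_foldl_insertBy, PySem.List.insertBy]
    | some m =>
      rw [hcase] at ih
      rw [pvInsertBy_getLast? _ x m (PySem.List.sorted_pairwise l pvCnt) hcase, ← ih]
      show some (if pvCnt m ≤ pvCnt x then x else m)
          = if pvCnt m ≤ pvCnt x then some x else some m
      split_ifs <;> rfl

-- names[-1] is the last element
theorem pvPyGet_neg_one (l : List String) : PySem.List.pyGet? l (-1) = l.getLast? := by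
  cases l with
  | nil => rfl
  | cons y t =>
    simp only [PySem.List.pyGet?, PySem.List.pyIdx?]
    have hle : -((y :: t).length : Int) ≤ -1 := by
      simp only [List.length_cons]; push_cast; omega
    rw [if_neg (by omega : ¬ (0 : Int) ≤ -1), if_pos hle]
    simp only [Option.bind]
    rw [List.getLast?_eq_getElem?]
    norm_num

-- ===== VERDICT (by name: the statement is the Claim_ definition above) =====
theorem pick_username_spec : Claim_equal_pick_username := by
  intro names _ hne
  unfold Spec_pick_username
  obtain ⟨x, rest, rfl⟩ : ∃ x rest, names = x :: rest := by
    cases names with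
    | nil => exact absurd rfl hne
    | cons a t => exact ⟨a, t, rfl⟩
  have hB : pick_username_alt (x :: rest) = pvChamp x rest := by
    simp only [pick_username_alt, pvCnt_key]
    rw [show (fun name => pvCnt name) = pvCnt from rfl, pvPyGet_neg_one, pvSorted_getLast?]
    have : pvChampO none (x :: rest) = pvChampO (some x) rest := rfl
    rw [this, pvChamp_eq_champO]
  rw [hB]
  simp only [pick_username, pvCnt_inner, pvA_outer]
  rw [PySem.List.enumerate_cons, List.foldl_cons]
  have h0 : pvCnt x ≥ (0 : Int) := by simp [pvCnt]
  rw [if_pos h0]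
  have hg0 : PySem.List.pyGetD (x :: rest) (0 : Int) "" = x := by
    simp [PySem.List.pyGetD, PySem.List.pyGet?, PySem.List.pyIdx?]
  have hall : ∀ p ∈ PySem.List.enumerate rest 1, PySem.List.pyGetD (x :: rest) p.1 "" = p.2 := by
    intro p hp
    rw [PySem.List.mem_enumerate_iff] at hp
    obtain ⟨k, hk, rfl⟩ := hp
    have : ((1 : Int) + k) = ((k + 1 : Nat) : Int) := by push_cast; ring
    rw [this, PySem.List.pyGetD_natCast]
    simp [List.getD, hk]
  obtain ⟨j, hfold, hgj⟩ := pvA_loop rest (fun i => PySem.List.pyGetD (x :: rest) i "") 1 0 x hg0 hall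
  norm_num
  rw [hfold]
  exact hgj
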